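-- pv_equiv track=rewrite | github.com/sbaskin/bioinformatics-3 | genes-proteins-genomes/overlap_alignment.py | get_backtrack
-- ===== SOURCE A (Python) =====
-- def get_backtrack(v,w):
--     sigma = 2
--     s = [[0]]
--     backtrack = [[""]]
--     for i in range(len(v)):
--         s.append([0])
--         backtrack.append(["source"])
--
--     for i in range(len(v)+1):
--         for j in range(len(w)):
--             s[i].append(0)
--             if i == 0:
--               backtrack[i].append("source")
--             else:
--               backtrack[i].append("")
--
--     for i in range(1, len(v)+1):
--         for j in range(1, len(w)+1):
--             match = 1 if v[i-1] == w[j-1] else -2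
--             s[i][j] = max(s[i-1][j] - sigma, s[i][j-1] - sigma, s[i-1][j-1] + match)
--             if s[i][j] == s[i-1][j] - sigma: #deletion
--                 backtrack[i][j] = 'down-deletion'
--             elif s[i][j] == s[i][j-1] - sigma: #insertion
--                 backtrack[i][j] = 'right-insertion'
--             elif v[i-1] == w[j-1]: #match
--                 backtrack[i][j] = 'diagonal'
--             else: #mismatch
--                 backtrack[i][j] = 'diagonal'
--     return (backtrack, s)
-- ===== SOURCE B (Python) =====
-- def get_backtrack(v, w):
--     sigma = 2
--     n, m = len(v), len(w)
--     memo = {}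
--
--     def cell(i, j):
--         # top-down memoized recurrence; called in table order so recursion stays shallow
--         if i == 0 or j == 0:
--             return 0
--         if (i, j) not in memo:
--             match = 1 if v[i - 1] == w[j - 1] else -2
--             memo[(i, j)] = max(cell(i - 1, j) - sigma,
--                                cell(i, j - 1) - sigma,
--                                cell(i - 1, j - 1) + match)
--         return memo[(i, j)]
--
--     def arrow(i, j):
--         if i == 0:
--             return "" if j == 0 else "source"
--         if j == 0:
--             return "source"
--         x = cell(i, j)
--         if x == cell(i - 1, j) - sigma:
--             return 'down-deletion'
--         if x == cell(i, j - 1) - sigma: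
--             return 'right-insertion'
--         return 'diagonal'
--
--     s = [[cell(i, j) for j in range(m + 1)] for i in range(n + 1)]
--     backtrack = [[arrow(i, j) for j in range(m + 1)] for i in range(n + 1)]
--     return (backtrack, s)
-- ===== Notes on version B (the rewrite author's own statement) =====
-- stated objective: alternative
-- what changed: A fills pre-allocated score and backtrack matrices bottom-up in one interleaved in-place nested loop; B computes each score cell by top-down memoized recursion on the recurrence (a closure over a memo dict) and a separate recursive arrow function, assembling both matrices by comprehensions over the cell/arrow functions.
import Mathlib
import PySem

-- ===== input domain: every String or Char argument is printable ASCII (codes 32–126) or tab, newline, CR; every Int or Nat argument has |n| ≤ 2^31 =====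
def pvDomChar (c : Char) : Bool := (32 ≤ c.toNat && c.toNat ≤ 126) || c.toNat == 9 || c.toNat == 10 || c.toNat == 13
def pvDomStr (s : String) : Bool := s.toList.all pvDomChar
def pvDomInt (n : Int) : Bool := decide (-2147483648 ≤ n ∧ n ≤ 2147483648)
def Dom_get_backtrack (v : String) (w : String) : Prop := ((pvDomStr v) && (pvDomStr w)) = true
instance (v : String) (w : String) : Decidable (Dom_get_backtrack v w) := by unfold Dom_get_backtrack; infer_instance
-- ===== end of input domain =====

-- B replaces A's interleaved bottom-up in-place table fill by a top-down memoized recursion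
-- on the DP recurrence (cell/arrow functions over a memo dict, here threaded as state),
-- assembling both matrices by comprehensions; same results, a different decomposition.

-- ===== PORT A =====
-- Literal port of A's in-place DP; Python list indexing/assignment is rendered with
-- getD/set/modify (all indices are in range by construction, defaults never read).
def get_backtrack (v : String) (w : String) : List (List String) × List (List Int) :=
  let vl := v.toList
  let wl := w.toList
  let sigma : Int := 2
  let sb1 := (List.range vl.length).foldl
    (fun p _ => (p.1 ++ [[(0 : Int)]], p.2 ++ [["source"]])) ([[(0 : Int)]], [[""]])
  let sb2 := (List.range (vl.length + 1)).foldl (fun p i =>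
    (List.range wl.length).foldl (fun q _ =>
      (q.1.modify i (fun row => row ++ [(0 : Int)]),
       q.2.modify i (fun row => row ++ [if i = 0 then "source" else ""]))) p) sb1
  let sb3 := (List.range' 1 vl.length).foldl (fun p i =>
    (List.range' 1 wl.length).foldl (fun q j =>
      let mtch : Int := if vl.getD (i - 1) ' ' = wl.getD (j - 1) ' ' then 1 else -2
      let val : Int := max (max ((q.1.getD (i - 1) []).getD j 0 - sigma)
                                ((q.1.getD i []).getD (j - 1) 0 - sigma))
                           ((q.1.getD (i - 1) []).getD (j - 1) 0 + mtch)
      let s' := q.1.modify i (fun row => row.set j val)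
      let bt : String :=
        if (s'.getD i []).getD j 0 = (s'.getD (i - 1) []).getD j 0 - sigma then "down-deletion"
        else if (s'.getD i []).getD j 0 = (s'.getD i []).getD (j - 1) 0 - sigma then "right-insertion"
        else if vl.getD (i - 1) ' ' = wl.getD (j - 1) ' ' then "diagonal"
        else "diagonal"
      (s', q.2.modify i (fun row => row.set j bt))) p) sb2
  (sb3.2, sb3.1)

-- ===== PORT B =====
-- Source B's mutable closure dict `memo` is rendered by threading the PySem.Dict through
-- the recursion and the comprehension folds (the standard state-passing port of mutation).
-- `cell(i, j)` of Source B: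
-- (fuel = i + j bounds the recursion depth; it only makes the recursion structural,
-- the 0-fuel branch is never reached when called with fuel = i + j)
def pvMemoCellF (vl wl : List Char) : Nat → Nat → Nat → PySem.Dict (Nat × Nat) Int →
    Int × PySem.Dict (Nat × Nat) Int
  | _, 0, _, memo => (0, memo)
  | _, _, 0, memo => (0, memo)
  | 0, _, _, memo => (0, memo)
  | fuel + 1, i, j, memo =>
    match memo.get? (i, j) with
    | some x => (x, memo)
    | none =>
      let mtch : Int := if vl.getD (i - 1) ' ' = wl.getD (j - 1) ' ' then 1 else -2
      let a := pvMemoCellF vl wl fuel (i - 1) j memo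
      let b := pvMemoCellF vl wl fuel i (j - 1) a.2
      let c := pvMemoCellF vl wl fuel (i - 1) (j - 1) b.2
      let val := max (max (a.1 - 2) (b.1 - 2)) (c.1 + mtch)
      (val, c.2.insert (i, j) val)

def pvMemoCell (vl wl : List Char) (i j : Nat) (memo : PySem.Dict (Nat × Nat) Int) :
    Int × PySem.Dict (Nat × Nat) Int :=
  pvMemoCellF vl wl (i + j) i j memo

-- `arrow(i, j)` of Source B:
def pvMemoArrow (vl wl : List Char) (i j : Nat) (memo : PySem.Dict (Nat × Nat) Int) :
    String × PySem.Dict (Nat × Nat) Int :=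
  if i = 0 then ((if j = 0 then "" else "source"), memo)
  else if j = 0 then ("source", memo)
  else
    let x := pvMemoCell vl wl i j memo
    let a := pvMemoCell vl wl (i - 1) j x.2
    if x.1 = a.1 - 2 then ("down-deletion", a.2)
    else
      let b := pvMemoCell vl wl i (j - 1) a.2
      if x.1 = b.1 - 2 then ("right-insertion", b.2)
      else ("diagonal", b.2)

-- the comprehensions of Source B, as memo-threading folds
def stepCellRow (vl wl : List Char) (i : Nat)
    (rp : List Int × PySem.Dict (Nat × Nat) Int) (j : Nat) :
    List Int × PySem.Dict (Nat × Nat) Int :=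
  let c := pvMemoCell vl wl i j rp.2
  (rp.1 ++ [c.1], c.2)
def stepCellMat (vl wl : List Char) (m : Nat)
    (acc : List (List Int) × PySem.Dict (Nat × Nat) Int) (i : Nat) :
    List (List Int) × PySem.Dict (Nat × Nat) Int :=
  let rp := (List.range (m + 1)).foldl (stepCellRow vl wl i) ([], acc.2)
  (acc.1 ++ [rp.1], rp.2)
def stepArrowRow (vl wl : List Char) (i : Nat)
    (rp : List String × PySem.Dict (Nat × Nat) Int) (j : Nat) :
    List String × PySem.Dict (Nat × Nat) Int :=
  let c := pvMemoArrow vl wl i j rp.2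
  (rp.1 ++ [c.1], c.2)
def stepArrowMat (vl wl : List Char) (m : Nat)
    (acc : List (List String) × PySem.Dict (Nat × Nat) Int) (i : Nat) :
    List (List String) × PySem.Dict (Nat × Nat) Int :=
  let rp := (List.range (m + 1)).foldl (stepArrowRow vl wl i) ([], acc.2)
  (acc.1 ++ [rp.1], rp.2)

def get_backtrack_alt (v : String) (w : String) : List (List String) × List (List Int) :=
  let vl := v.toList
  let wl := w.toList
  let n := vl.length
  let m := wl.length
  let sP := (List.range (n + 1)).foldl (stepCellMat vl wl m) ([], PySem.Dict.empty)
  let bP := (List.range (n + 1)).foldl (stepArrowMat vl wl m) ([], sP.2)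
  (bP.1, sP.1)

-- ===== PRECONDITION & SPEC =====
def Spec_get_backtrack (v : String) (w : String) (out : List (List String) × List (List Int)) : Prop := out = get_backtrack_alt v w
instance (v : String) (w : String) (out : List (List String) × List (List Int)) : Decidable (Spec_get_backtrack v w out) := by unfold Spec_get_backtrack; infer_instance

-- ===== CLAIM (what is proved, stated in full; the proofs are below) =====
def Claim_equal_get_backtrack : Prop := ∀ (v : String) (w : String), Dom_get_backtrack v w → Spec_get_backtrack v w (get_backtrack v w)

-- ===== LEMMAS AND PROOFS =====

/-- The mathematical DP cell value both programs compute. -/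
def pvCell (vl wl : List Char) : Nat → Nat → Int
  | 0, _ => 0
  | _ + 1, 0 => 0
  | i + 1, j + 1 =>
      max (max (pvCell vl wl i (j + 1) - 2) (pvCell vl wl (i + 1) j - 2))
          (pvCell vl wl i j + (if vl.getD i ' ' = wl.getD j ' ' then (1 : Int) else -2))
termination_by i j => (i, j)

def pvZ (m : Nat) : List Int := List.replicate (m + 1) 0
def pvSrow (vl wl : List Char) (m i : Nat) : List Int := (List.range (m + 1)).map (pvCell vl wl i)
def pvBtf (vl wl : List Char) (i j : Nat) : String :=
  if pvCell vl wl i j = pvCell vl wl (i - 1) j - 2 then "down-deletion"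
  else if pvCell vl wl i j = pvCell vl wl i (j - 1) - 2 then "right-insertion"
  else "diagonal"
def pvBrow (vl wl : List Char) (m i : Nat) : List String :=
  "source" :: (List.range' 1 m).map (pvBtf vl wl i)
def pvF0 (m : Nat) : List String := "" :: List.replicate m "source"
def pvFb (m : Nat) : List String := "source" :: List.replicate m ""
def pvCanonS (vl wl : List Char) : List (List Int) :=
  (List.range (vl.length + 1)).map (pvSrow vl wl wl.length)
def pvCanonB (vl wl : List Char) : List (List String) :=
  pvF0 wl.length :: (List.range' 1 vl.length).map (pvBrow vl wl wl.length)

-- partial rows / matrix states during A's third loop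
def pvSPart (vl wl : List Char) (m i j : Nat) : List Int :=
  (List.range j).map (pvCell vl wl i) ++ List.replicate (m + 1 - j) 0
def pvBPart (vl wl : List Char) (m i j : Nat) : List String :=
  "source" :: ((List.range' 1 (j - 1)).map (pvBtf vl wl i) ++ List.replicate (m + 1 - j) "")
def pvSSt (vl wl : List Char) (n m i : Nat) (row : List Int) : List (List Int) :=
  (List.range i).map (pvSrow vl wl m) ++ row :: List.replicate (n - i) (pvZ m)
def pvBSt (vl wl : List Char) (n m i : Nat) (row : List String) : List (List String) :=
  pvF0 m :: ((List.range' 1 (i - 1)).map (pvBrow vl wl m) ++ row :: List.replicate (n - i) (pvFb m))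

-- named step functions (definitionally those appearing in port A)
def stepA1 (p : List (List Int) × List (List String)) (_ : Nat) :
    List (List Int) × List (List String) := (p.1 ++ [[(0 : Int)]], p.2 ++ [["source"]])
def stepA2 (m : Nat) (p : List (List Int) × List (List String)) (i : Nat) :
    List (List Int) × List (List String) :=
  (List.range m).foldl (fun q _ =>
    (q.1.modify i (fun row => row ++ [(0 : Int)]),
     q.2.modify i (fun row => row ++ [if i = 0 then "source" else ""]))) p
def stepA3i (vl wl : List Char) (i : Nat) (q : List (List Int) × List (List String)) (j : Nat) :
    List (List Int) × List (List String) :=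
  let mtch : Int := if vl.getD (i - 1) ' ' = wl.getD (j - 1) ' ' then 1 else -2
  let val : Int := max (max ((q.1.getD (i - 1) []).getD j 0 - 2)
                            ((q.1.getD i []).getD (j - 1) 0 - 2))
                       ((q.1.getD (i - 1) []).getD (j - 1) 0 + mtch)
  let s' := q.1.modify i (fun row => row.set j val)
  let bt : String :=
    if (s'.getD i []).getD j 0 = (s'.getD (i - 1) []).getD j 0 - 2 then "down-deletion"
    else if (s'.getD i []).getD j 0 = (s'.getD i []).getD (j - 1) 0 - 2 then "right-insertion"
    else if vl.getD (i - 1) ' ' = wl.getD (j - 1) ' ' then "diagonal"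
    else "diagonal"
  (s', q.2.modify i (fun row => row.set j bt))
def stepA3 (vl wl : List Char) (p : List (List Int) × List (List String)) (i : Nat) :
    List (List Int) × List (List String) :=
  (List.range' 1 wl.length).foldl (stepA3i vl wl i) p

-- generic list lemmas
theorem pv_getD_map_range {α : Type} (f : Nat → α) {j L : Nat} (h : j < L) (d : α) :
    ((List.range L).map f).getD j d = f j := by
  simp [List.getD_eq_getElem?_getD, List.getElem?_range h]

theorem pv_getD_append_left {α : Type} {X Y : List α} {j : Nat} (h : j < X.length) (d : α) :
    (X ++ Y).getD j d = X.getD j d := by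
  simp [List.getD_eq_getElem?_getD, List.getElem?_append_left h]

theorem pv_getD_append_length {α : Type} (X : List α) (y : α) (Y : List α) (d : α) :
    (X ++ y :: Y).getD X.length d = y := by
  simp [List.getD_eq_getElem?_getD]

theorem pv_modify_append_cons {α : Type} (X : List α) (y : α) (Y : List α) (f : α → α) :
    (X ++ y :: Y).modify X.length f = X ++ f y :: Y := by
  induction X with
  | nil => simp [List.modify_cons]
  | cons a X ih =>
    rw [show (a :: X).length = X.length + 1 from rfl, List.cons_append, List.modify_cons]
    simp [ih]

theorem pv_set_append_cons {α : Type} (X : List α) (y v : α) (Y : List α) :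
    (X ++ y :: Y).set X.length v = X ++ v :: Y := by
  induction X with
  | nil => simp
  | cons a X ih => simp [ih]

theorem pv_modify_modify {α : Type} (l : List α) (i : Nat) (f g : α → α) :
    (l.modify i f).modify i g = l.modify i (fun a => g (f a)) := by
  induction l generalizing i with
  | nil => simp
  | cons a l ih =>
    cases i with
    | zero => simp [List.modify_cons]
    | succ i => simp only [List.modify_cons]; simp [ih]

theorem pv_modify_id {α : Type} (l : List α) (i : Nat) :
    l.modify i (fun a => a) = l := by
  induction l generalizing i with
  | nil => simp
  | cons a l ih =>
    cases i with
    | zero => simp [List.modify_cons]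
    | succ i => simp only [List.modify_cons]; simp [ih]

-- cell basics
theorem pvCell_zero_left (vl wl : List Char) (j : Nat) : pvCell vl wl 0 j = 0 := by
  simp [pvCell]

theorem pvCell_zero_right (vl wl : List Char) (i : Nat) : pvCell vl wl i 0 = 0 := by
  cases i <;> simp [pvCell]

theorem pvCell_succ (vl wl : List Char) {i j : Nat} (hi : 1 ≤ i) (hj : 1 ≤ j) :
    pvCell vl wl i j =
      max (max (pvCell vl wl (i - 1) j - 2) (pvCell vl wl i (j - 1) - 2))
          (pvCell vl wl (i - 1) (j - 1) +
            (if vl.getD (i - 1) ' ' = wl.getD (j - 1) ' ' then (1 : Int) else -2)) := by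
  cases i with
  | zero => omega
  | succ i =>
    cases j with
    | zero => omega
    | succ j => simp [pvCell]

theorem pvSrow_zero (vl wl : List Char) (m : Nat) : pvSrow vl wl m 0 = pvZ m := by
  unfold pvSrow pvZ
  induction (m + 1) with
  | zero => simp
  | succ k ih => rw [List.range_succ, List.map_append, ih]
                 simp [pvCell_zero_left, List.replicate_succ']

theorem pvSPart_one (vl wl : List Char) (m i : Nat) : pvSPart vl wl m i 1 = pvZ m := by
  unfold pvSPart pvZ
  simp [List.range_succ, pvCell_zero_right, List.replicate_succ]

theorem pvBPart_one (vl wl : List Char) (m i : Nat) : pvBPart vl wl m i 1 = pvFb m := by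
  unfold pvBPart pvFb
  simp

theorem pvSPart_last (vl wl : List Char) (m i : Nat) : pvSPart vl wl m i (m + 1) = pvSrow vl wl m i := by
  unfold pvSPart pvSrow
  simp

theorem pvBPart_last (vl wl : List Char) (m i : Nat) : pvBPart vl wl m i (m + 1) = pvBrow vl wl m i := by
  unfold pvBPart pvBrow
  simp

-- ---------- A side ----------

theorem pv_A1 {α β : Type} (l : List Nat) (x : α) (y : β) :
    ∀ (s : List α) (b : List β),
      l.foldl (fun p _ => (p.1 ++ [x], p.2 ++ [y])) (s, b)
        = (s ++ List.replicate l.length x, b ++ List.replicate l.length y) := by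
  induction l with
  | nil => intro s b; simp
  | cons a l ih =>
    intro s b
    simp only [List.foldl_cons, List.length_cons, ih]
    simp [List.replicate_succ, List.append_assoc]

theorem pv_A2_inner (l : List Nat) (i : Nat) :
    ∀ (s : List (List Int)) (b : List (List String)),
      l.foldl (fun q _ =>
          (q.1.modify i (fun row => row ++ [(0 : Int)]),
           q.2.modify i (fun row => row ++ [if i = 0 then "source" else ""]))) (s, b)
        = (s.modify i (fun row => row ++ List.replicate l.length (0 : Int)),
           b.modify i (fun row => row ++ List.replicate l.length (if i = 0 then "source" else ""))) := by
  induction l with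
  | nil =>
    intro s b
    simp [pv_modify_id]
  | cons a l ih =>
    intro s b
    simp only [List.foldl_cons, List.length_cons, ih, pv_modify_modify]
    simp [List.replicate_succ, List.append_assoc]

def pvMS (vl wl : List Char) (n m i : Nat) : List (List Int) :=
  (List.range i).map (pvSrow vl wl m) ++ List.replicate (n + 1 - i) (pvZ m)
def pvMB (vl wl : List Char) (n m i : Nat) : List (List String) :=
  pvF0 m :: ((List.range' 1 (i - 1)).map (pvBrow vl wl m) ++ List.replicate (n + 1 - i) (pvFb m))

theorem pv_A2_outer (n m : Nat) :
    ∀ (t i : Nat), 1 ≤ i → i + t = n + 1 →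
      (List.range' i t).foldl (stepA2 m)
          (List.replicate i (pvZ m) ++ List.replicate (n + 1 - i) [(0 : Int)],
           pvF0 m :: (List.replicate (i - 1) (pvFb m) ++ List.replicate (n + 1 - i) ["source"]))
        = (List.replicate (n + 1) (pvZ m), pvF0 m :: List.replicate n (pvFb m)) := by
  intro t
  induction t with
  | zero =>
    intro i hi hsum
    have : i = n + 1 := by omega
    subst this
    simp
  | succ t ih =>
    intro i hi hsum
    rw [List.range'_succ, List.foldl_cons]
    have hi0 : ¬ (i = 0) := by omega
    have hrep : List.replicate (n + 1 - i) [(0 : Int)] = [(0 : Int)] :: List.replicate (n - i) [(0 : Int)] := by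
      rw [← List.replicate_succ]; congr 1; omega
    have hrepb : List.replicate (n + 1 - i) ["source"] = ["source"] :: List.replicate (n - i) ["source"] := by
      rw [← List.replicate_succ]; congr 1; omega
    rw [hrep, hrepb]
    unfold stepA2
    rw [pv_A2_inner]
    have hlen : (List.replicate i (pvZ m)).length = i := by simp
    have hlenb : (List.replicate (i - 1) (pvFb m)).length = i - 1 := by simp
    have key1 := pv_modify_append_cons (List.replicate i (pvZ m)) [(0 : Int)]
      (List.replicate (n - i) [(0 : Int)]) (fun row => row ++ List.replicate (List.range m).length (0 : Int))
    rw [hlen] at key1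
    have key2 := pv_modify_append_cons (List.replicate (i - 1) (pvFb m)) ["source"]
      (List.replicate (n - i) ["source"])
      (fun row => row ++ List.replicate (List.range m).length (if i = 0 then "source" else ""))
    rw [hlenb] at key2
    rw [List.modify_cons, if_neg hi0, key1, key2]
    have hZ : ([(0 : Int)] ++ List.replicate (List.range m).length (0 : Int)) = pvZ m := by
      simp [pvZ, List.replicate_succ]
    have hFb : (["source"] ++ List.replicate (List.range m).length (if i = 0 then "source" else "")) = pvFb m := by
      rw [if_neg hi0]; simp [pvFb]
    rw [hZ, hFb]
    have e1 : List.replicate i (pvZ m) ++ pvZ m :: List.replicate (n - i) [(0 : Int)]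
        = List.replicate (i + 1) (pvZ m) ++ List.replicate (n + 1 - (i + 1)) [(0 : Int)] := by
      rw [List.replicate_succ' (n := i), show n + 1 - (i + 1) = n - i by omega]
      simp [List.append_assoc]
    have e2 : pvF0 m :: (List.replicate (i - 1) (pvFb m) ++ pvFb m :: List.replicate (n - i) ["source"])
        = pvF0 m :: (List.replicate (i + 1 - 1) (pvFb m) ++ List.replicate (n + 1 - (i + 1)) ["source"]) := by
      rw [show i + 1 - 1 = i by omega, show n + 1 - (i + 1) = n - i by omega]
      have hsplit : List.replicate i (pvFb m) = List.replicate (i - 1) (pvFb m) ++ [pvFb m] := by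
        conv_lhs => rw [show i = (i - 1) + 1 by omega]
        exact List.replicate_succ'
      rw [hsplit]
      simp [List.append_assoc]
    rw [e1, e2]
    exact ih (i + 1) (by omega) (by omega)

-- third loop of A: one inner step
theorem pv_stepA3i (vl wl : List Char) (n m i j : Nat)
    (hi : 1 ≤ i) (_hin : i ≤ n) (hj : 1 ≤ j) (hjm : j ≤ m) :
    stepA3i vl wl i
        (pvSSt vl wl n m i (pvSPart vl wl m i j), pvBSt vl wl n m i (pvBPart vl wl m i j)) j
      = (pvSSt vl wl n m i (pvSPart vl wl m i (j + 1)), pvBSt vl wl n m i (pvBPart vl wl m i (j + 1))) := by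
  have hlenS : ((List.range i).map (pvSrow vl wl m)).length = i := by simp
  have hgetS : ∀ (row : List Int), (pvSSt vl wl n m i row).getD i [] = row := by
    intro row
    have key := pv_getD_append_length ((List.range i).map (pvSrow vl wl m)) row
      (List.replicate (n - i) (pvZ m)) ([] : List Int)
    rw [hlenS] at key
    exact key
  have hgetS1 : ∀ (row : List Int), (pvSSt vl wl n m i row).getD (i - 1) [] = pvSrow vl wl m (i - 1) := by
    intro row
    unfold pvSSt
    rw [pv_getD_append_left (by omega : i - 1 < ((List.range i).map (pvSrow vl wl m)).length)]
    exact pv_getD_map_range _ (by omega) _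
  have hSrowget : ∀ (k j' : Nat), j' ≤ m → (pvSrow vl wl m k).getD j' 0 = pvCell vl wl k j' := by
    intro k j' h
    exact pv_getD_map_range _ (by omega) _
  have hPartget : ∀ (j' jj : Nat), j' < jj → (pvSPart vl wl m i jj).getD j' 0 = pvCell vl wl i j' := by
    intro j' jj h
    unfold pvSPart
    rw [pv_getD_append_left (by simp; omega)]
    exact pv_getD_map_range _ h _
  have hval : max (max ((pvSrow vl wl m (i - 1)).getD j 0 - 2) ((pvSPart vl wl m i j).getD (j - 1) 0 - 2))
        ((pvSrow vl wl m (i - 1)).getD (j - 1) 0 +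
          (if vl.getD (i - 1) ' ' = wl.getD (j - 1) ' ' then (1 : Int) else -2))
      = pvCell vl wl i j := by
    rw [hSrowget _ _ (by omega), hPartget _ _ (by omega), hSrowget _ _ (by omega)]
    exact (pvCell_succ vl wl hi hj).symm
  have hlenP : ((List.range j).map (pvCell vl wl i)).length = j := by simp
  have hsetrow : (pvSPart vl wl m i j).set j (pvCell vl wl i j) = pvSPart vl wl m i (j + 1) := by
    unfold pvSPart
    have hrep : List.replicate (m + 1 - j) (0 : Int) = (0 : Int) :: List.replicate (m - j) 0 := by
      rw [← List.replicate_succ]; congr 1; omega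
    rw [hrep]
    have key := pv_set_append_cons ((List.range j).map (pvCell vl wl i)) (0 : Int)
      (pvCell vl wl i j) (List.replicate (m - j) (0 : Int))
    rw [hlenP] at key
    rw [key, List.range_succ, List.map_append, show m + 1 - (j + 1) = m - j by omega]
    simp [List.append_assoc]
  have hmodS : (pvSSt vl wl n m i (pvSPart vl wl m i j)).modify i
        (fun row => row.set j (pvCell vl wl i j)) = pvSSt vl wl n m i (pvSPart vl wl m i (j + 1)) := by
    unfold pvSSt
    have key := pv_modify_append_cons ((List.range i).map (pvSrow vl wl m)) (pvSPart vl wl m i j)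
      (List.replicate (n - i) (pvZ m)) (fun row => row.set j (pvCell vl wl i j))
    rw [hlenS] at key
    rw [key, hsetrow]
  have hbt : (if (pvSPart vl wl m i (j + 1)).getD j 0 = (pvSrow vl wl m (i - 1)).getD j 0 - 2 then "down-deletion"
        else if (pvSPart vl wl m i (j + 1)).getD j 0 = (pvSPart vl wl m i (j + 1)).getD (j - 1) 0 - 2 then "right-insertion"
        else if vl.getD (i - 1) ' ' = wl.getD (j - 1) ' ' then "diagonal" else "diagonal")
      = pvBtf vl wl i j := by
    rw [hPartget _ _ (by omega), hPartget _ _ (by omega), hSrowget _ _ (by omega)]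
    unfold pvBtf
    rw [ite_self]
  have hsetb : (pvBPart vl wl m i j).set j (pvBtf vl wl i j) = pvBPart vl wl m i (j + 1) := by
    obtain ⟨j', rfl⟩ : ∃ j', j = j' + 1 := ⟨j - 1, by omega⟩
    unfold pvBPart
    simp only [Nat.add_sub_cancel]
    have hrep : List.replicate (m + 1 - (j' + 1)) "" = "" :: List.replicate (m - (j' + 1)) "" := by
      rw [← List.replicate_succ]; congr 1; omega
    rw [hrep, List.set_cons_succ]
    have key := pv_set_append_cons ((List.range' 1 j').map (pvBtf vl wl i)) ""
      (pvBtf vl wl i (j' + 1)) (List.replicate (m - (j' + 1)) "")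
    have hlenB : ((List.range' 1 j').map (pvBtf vl wl i)).length = j' := by simp
    rw [hlenB] at key
    rw [key, show m + 1 - (j' + 1 + 1) = m - (j' + 1) by omega]
    have hrng : List.range' 1 (j' + 1) = List.range' 1 j' ++ [j' + 1] := by
      rw [List.range'_concat]
      congr 2
      omega
    rw [hrng]
    simp [List.append_assoc]
  have hmodB : (pvBSt vl wl n m i (pvBPart vl wl m i j)).modify i
        (fun row => row.set j (pvBtf vl wl i j)) = pvBSt vl wl n m i (pvBPart vl wl m i (j + 1)) := by
    unfold pvBSt
    have hlenB : ((List.range' 1 (i - 1)).map (pvBrow vl wl m)).length = i - 1 := by simp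
    rw [List.modify_cons, if_neg (by omega : ¬ (i = 0))]
    have key := pv_modify_append_cons ((List.range' 1 (i - 1)).map (pvBrow vl wl m)) (pvBPart vl wl m i j)
      (List.replicate (n - i) (pvFb m)) (fun row => row.set j (pvBtf vl wl i j))
    rw [hlenB] at key
    rw [key, hsetb]
  simp only [stepA3i]
  simp only [hgetS, hgetS1]
  rw [hval, hmodS]
  simp only [hgetS, hgetS1]
  rw [hbt, hmodB]

theorem pv_A3_inner (vl wl : List Char) (n m i : Nat) (hi : 1 ≤ i) (hin : i ≤ n) :
    ∀ (t j : Nat), 1 ≤ j → j + t = m + 1 →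
      (List.range' j t).foldl (stepA3i vl wl i)
          (pvSSt vl wl n m i (pvSPart vl wl m i j), pvBSt vl wl n m i (pvBPart vl wl m i j))
        = (pvSSt vl wl n m i (pvSrow vl wl m i), pvBSt vl wl n m i (pvBrow vl wl m i)) := by
  intro t
  induction t with
  | zero =>
    intro j hj hsum
    have : j = m + 1 := by omega
    subst this
    rw [pvSPart_last, pvBPart_last]
    simp
  | succ t ih =>
    intro j hj hsum
    rw [List.range'_succ, List.foldl_cons, pv_stepA3i vl wl n m i j hi hin hj (by omega)]
    exact ih (j + 1) (by omega) (by omega)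

theorem pv_A3_outer (vl wl : List Char) (n m : Nat) (hm : m = wl.length) :
    ∀ (t i : Nat), 1 ≤ i → i + t = n + 1 →
      (List.range' i t).foldl (stepA3 vl wl) (pvMS vl wl n m i, pvMB vl wl n m i)
        = (pvMS vl wl n m (n + 1), pvMB vl wl n m (n + 1)) := by
  intro t
  induction t with
  | zero =>
    intro i hi hsum
    have : i = n + 1 := by omega
    subst this
    rfl
  | succ t ih =>
    intro i hi hsum
    rw [List.range'_succ, List.foldl_cons]
    have hstate : (pvMS vl wl n m i, pvMB vl wl n m i)
        = (pvSSt vl wl n m i (pvSPart vl wl m i 1), pvBSt vl wl n m i (pvBPart vl wl m i 1)) := by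
      rw [pvSPart_one, pvBPart_one]
      unfold pvMS pvMB pvSSt pvBSt
      have h1 : List.replicate (n + 1 - i) (pvZ m) = pvZ m :: List.replicate (n - i) (pvZ m) := by
        rw [← List.replicate_succ]; congr 1; omega
      have h2 : List.replicate (n + 1 - i) (pvFb m) = pvFb m :: List.replicate (n - i) (pvFb m) := by
        rw [← List.replicate_succ]; congr 1; omega
      rw [h1, h2]
    rw [hstate]
    have hstep : stepA3 vl wl (pvSSt vl wl n m i (pvSPart vl wl m i 1), pvBSt vl wl n m i (pvBPart vl wl m i 1)) i
        = (pvSSt vl wl n m i (pvSrow vl wl m i), pvBSt vl wl n m i (pvBrow vl wl m i)) := by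
      unfold stepA3
      rw [← hm]
      exact pv_A3_inner vl wl n m i hi (by omega) m 1 (by omega) (by omega)
    rw [hstep]
    have hnext : (pvSSt vl wl n m i (pvSrow vl wl m i), pvBSt vl wl n m i (pvBrow vl wl m i))
        = (pvMS vl wl n m (i + 1), pvMB vl wl n m (i + 1)) := by
      unfold pvSSt pvBSt pvMS pvMB
      have h1 : n + 1 - (i + 1) = n - i := by omega
      have h2 : (i + 1) - 1 = i := by omega
      rw [h1, h2]
      have h3 : List.range (i + 1) = List.range i ++ [i] := List.range_succ
      have h4 : List.range' 1 i = List.range' 1 (i - 1) ++ [i] := by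
        conv_lhs => rw [show i = (i - 1) + 1 by omega]
        rw [List.range'_concat]
        congr 2
        omega
      rw [h3, h4]
      simp [List.append_assoc]
    rw [hnext]
    exact ih (i + 1) (by omega) (by omega)

theorem pv_portA (v w : String) :
    get_backtrack v w = (pvCanonB v.toList w.toList, pvCanonS v.toList w.toList) := by
  have h0 : get_backtrack v w =
      (fun sb : List (List Int) × List (List String) => (sb.2, sb.1))
        ((List.range' 1 v.toList.length).foldl (stepA3 v.toList w.toList)
          ((List.range (v.toList.length + 1)).foldl (stepA2 w.toList.length)
            ((List.range v.toList.length).foldl stepA1 ([[(0 : Int)]], [[""]])))) := rfl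
  rw [h0]
  have h1 : (List.range v.toList.length).foldl stepA1 ([[(0 : Int)]], [[""]])
      = (List.replicate (v.toList.length + 1) [(0 : Int)], [""] :: List.replicate v.toList.length ["source"]) := by
    unfold stepA1
    rw [pv_A1]
    simp [List.replicate_succ]
  rw [h1]
  have h2 : (List.range (v.toList.length + 1)).foldl (stepA2 w.toList.length)
        (List.replicate (v.toList.length + 1) [(0 : Int)], [""] :: List.replicate v.toList.length ["source"])
      = (List.replicate (v.toList.length + 1) (pvZ w.toList.length),
         pvF0 w.toList.length :: List.replicate v.toList.length (pvFb w.toList.length)) := by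
    have hr : List.range (v.toList.length + 1) = 0 :: List.range' 1 v.toList.length := by
      rw [List.range_eq_range']
      rfl
    rw [hr, List.foldl_cons]
    have hstep0 : stepA2 w.toList.length
          (List.replicate (v.toList.length + 1) [(0 : Int)], [""] :: List.replicate v.toList.length ["source"]) 0
        = (pvZ w.toList.length :: List.replicate v.toList.length [(0 : Int)],
           pvF0 w.toList.length :: List.replicate v.toList.length ["source"]) := by
      unfold stepA2
      rw [pv_A2_inner]
      have hrep : List.replicate (v.toList.length + 1) [(0 : Int)]
          = [(0 : Int)] :: List.replicate v.toList.length [(0 : Int)] := List.replicate_succ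
      rw [hrep]
      simp [List.modify_cons, pvZ, pvF0, List.replicate_succ]
    rw [hstep0]
    have := pv_A2_outer v.toList.length w.toList.length v.toList.length 1 (by omega) (by omega)
    simp only [Nat.add_sub_cancel, Nat.sub_self] at this
    simpa [List.replicate_succ] using this
  rw [h2]
  have hms : (List.replicate (v.toList.length + 1) (pvZ w.toList.length),
        pvF0 w.toList.length :: List.replicate v.toList.length (pvFb w.toList.length))
      = (pvMS v.toList w.toList v.toList.length w.toList.length 1,
         pvMB v.toList w.toList v.toList.length w.toList.length 1) := by
    unfold pvMS pvMB
    simp [List.replicate_succ, pvSrow_zero, List.range_succ]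
  rw [hms]
  rw [pv_A3_outer v.toList w.toList v.toList.length w.toList.length rfl v.toList.length 1 (by omega) (by omega)]
  unfold pvMS pvMB pvCanonS pvCanonB
  simp

-- ---------- B side ----------

/-- Every value stored in the memo is the corresponding DP cell value. -/
def pvMemoOK (vl wl : List Char) (memo : PySem.Dict (Nat × Nat) Int) : Prop :=
  ∀ (p : Nat × Nat) (x : Int), memo.get? p = some x → x = pvCell vl wl p.1 p.2

/-- The arrow value Source B's `arrow` computes. -/
def pvArrow (vl wl : List Char) (i j : Nat) : String :=
  if i = 0 then (if j = 0 then "" else "source")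
  else if j = 0 then "source"
  else pvBtf vl wl i j

theorem pvMemoCellF_ok (vl wl : List Char) :
    ∀ (fuel i j : Nat) (memo : PySem.Dict (Nat × Nat) Int), i + j ≤ fuel → pvMemoOK vl wl memo →
      (pvMemoCellF vl wl fuel i j memo).1 = pvCell vl wl i j ∧
        pvMemoOK vl wl (pvMemoCellF vl wl fuel i j memo).2 := by
  intro fuel
  induction fuel with
  | zero =>
    intro i j memo hN hm
    have hi : i = 0 := by omega
    subst hi
    exact ⟨by simp [pvMemoCellF, pvCell_zero_left], by simpa [pvMemoCellF] using hm⟩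
  | succ fuel ih =>
    intro i j memo hN hm
    cases i with
    | zero =>
      exact ⟨by simp [pvMemoCellF, pvCell_zero_left], by simpa [pvMemoCellF] using hm⟩
    | succ i' =>
      cases j with
      | zero =>
        exact ⟨by simp [pvMemoCellF, pvCell_zero_right], by simpa [pvMemoCellF] using hm⟩
      | succ j' =>
        cases hg : memo.get? (i' + 1, j' + 1) with
        | some x =>
          refine ⟨?_, ?_⟩ <;> simp only [pvMemoCellF, hg]
          · exact hm (i' + 1, j' + 1) x hg
          · exact hm
        | none =>
          obtain ⟨ha1, ha2⟩ := ih i' (j' + 1) memo (by omega) hm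
          obtain ⟨hb1, hb2⟩ := ih (i' + 1) j' (pvMemoCellF vl wl fuel i' (j' + 1) memo).2 (by omega) ha2
          obtain ⟨hc1, hc2⟩ := ih i' j'
            (pvMemoCellF vl wl fuel (i' + 1) j' (pvMemoCellF vl wl fuel i' (j' + 1) memo).2).2 (by omega) hb2
          have hrec := pvCell_succ vl wl (i := i' + 1) (j := j' + 1) (by omega) (by omega)
          simp only [Nat.add_sub_cancel] at hrec
          refine ⟨?_, ?_⟩ <;> simp only [pvMemoCellF, hg, Nat.add_sub_cancel]
          · rw [ha1, hb1, hc1]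
            exact hrec.symm
          · intro p x hx
            rw [PySem.Dict.get?_insert] at hx
            by_cases hp : p = (i' + 1, j' + 1)
            · rw [hp] at hx ⊢
              rw [if_pos rfl] at hx
              cases hx
              rw [ha1, hb1, hc1]
              exact hrec.symm
            · rw [if_neg hp] at hx
              exact hc2 p x hx

theorem pvMemoCell_ok (vl wl : List Char) (i j : Nat) (memo : PySem.Dict (Nat × Nat) Int)
    (hm : pvMemoOK vl wl memo) :
    (pvMemoCell vl wl i j memo).1 = pvCell vl wl i j ∧
      pvMemoOK vl wl (pvMemoCell vl wl i j memo).2 := by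
  unfold pvMemoCell
  exact pvMemoCellF_ok vl wl (i + j) i j memo le_rfl hm

theorem pvMemoArrow_ok (vl wl : List Char) (i j : Nat) (memo : PySem.Dict (Nat × Nat) Int)
    (hm : pvMemoOK vl wl memo) :
    (pvMemoArrow vl wl i j memo).1 = pvArrow vl wl i j ∧
      pvMemoOK vl wl (pvMemoArrow vl wl i j memo).2 := by
  unfold pvMemoArrow pvArrow
  by_cases hi : i = 0
  · rw [if_pos hi, if_pos hi]
    exact ⟨rfl, hm⟩
  · rw [if_neg hi, if_neg hi]
    by_cases hj : j = 0
    · rw [if_pos hj, if_pos hj]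
      exact ⟨rfl, hm⟩
    · rw [if_neg hj, if_neg hj]
      obtain ⟨hx1, hx2⟩ := pvMemoCell_ok vl wl i j memo hm
      obtain ⟨ha1, ha2⟩ := pvMemoCell_ok vl wl (i - 1) j (pvMemoCell vl wl i j memo).2 hx2
      obtain ⟨hb1, hb2⟩ := pvMemoCell_ok vl wl i (j - 1)
        (pvMemoCell vl wl (i - 1) j (pvMemoCell vl wl i j memo).2).2 ha2
      simp only [hx1, ha1, hb1]
      unfold pvBtf
      by_cases h1 : pvCell vl wl i j = pvCell vl wl (i - 1) j - 2
      · rw [if_pos h1, if_pos h1]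
        exact ⟨rfl, ha2⟩
      · rw [if_neg h1, if_neg h1]
        by_cases h2 : pvCell vl wl i j = pvCell vl wl i (j - 1) - 2
        · rw [if_pos h2, if_pos h2]
          exact ⟨rfl, hb2⟩
        · rw [if_neg h2, if_neg h2]
          exact ⟨rfl, hb2⟩

theorem pv_B_cellRow (vl wl : List Char) (i : Nat) :
    ∀ (l : List Nat) (acc : List Int) (memo : PySem.Dict (Nat × Nat) Int), pvMemoOK vl wl memo →
      (l.foldl (stepCellRow vl wl i) (acc, memo)).1 = acc ++ l.map (pvCell vl wl i) ∧
        pvMemoOK vl wl (l.foldl (stepCellRow vl wl i) (acc, memo)).2 := by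
  intro l
  induction l with
  | nil => intro acc memo hm; simpa using hm
  | cons j l ih =>
    intro acc memo hm
    obtain ⟨h1, h2⟩ := pvMemoCell_ok vl wl i j memo hm
    rw [List.foldl_cons]
    have hstep : stepCellRow vl wl i (acc, memo) j
        = (acc ++ [pvCell vl wl i j], (pvMemoCell vl wl i j memo).2) := by
      simp only [stepCellRow]
      rw [h1]
    rw [hstep]
    obtain ⟨g1, g2⟩ := ih (acc ++ [pvCell vl wl i j]) (pvMemoCell vl wl i j memo).2 h2
    refine ⟨?_, g2⟩
    rw [g1]
    simp [List.append_assoc]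

theorem pv_B_cellMat (vl wl : List Char) (m : Nat) :
    ∀ (l : List Nat) (acc : List (List Int)) (memo : PySem.Dict (Nat × Nat) Int), pvMemoOK vl wl memo →
      (l.foldl (stepCellMat vl wl m) (acc, memo)).1
          = acc ++ l.map (fun i => (List.range (m + 1)).map (pvCell vl wl i)) ∧
        pvMemoOK vl wl (l.foldl (stepCellMat vl wl m) (acc, memo)).2 := by
  intro l
  induction l with
  | nil => intro acc memo hm; simpa using hm
  | cons i l ih =>
    intro acc memo hm
    obtain ⟨h1, h2⟩ := pv_B_cellRow vl wl i (List.range (m + 1)) [] memo hm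
    rw [List.foldl_cons]
    have hstep : stepCellMat vl wl m (acc, memo) i
        = (acc ++ [(List.range (m + 1)).map (pvCell vl wl i)],
           ((List.range (m + 1)).foldl (stepCellRow vl wl i) ([], memo)).2) := by
      simp only [stepCellMat]
      rw [h1]
      simp
    rw [hstep]
    obtain ⟨g1, g2⟩ := ih _ _ h2
    refine ⟨?_, g2⟩
    rw [g1]
    simp [List.append_assoc]

theorem pv_B_arrowRow (vl wl : List Char) (i : Nat) :
    ∀ (l : List Nat) (acc : List String) (memo : PySem.Dict (Nat × Nat) Int), pvMemoOK vl wl memo →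
      (l.foldl (stepArrowRow vl wl i) (acc, memo)).1 = acc ++ l.map (pvArrow vl wl i) ∧
        pvMemoOK vl wl (l.foldl (stepArrowRow vl wl i) (acc, memo)).2 := by
  intro l
  induction l with
  | nil => intro acc memo hm; simpa using hm
  | cons j l ih =>
    intro acc memo hm
    obtain ⟨h1, h2⟩ := pvMemoArrow_ok vl wl i j memo hm
    rw [List.foldl_cons]
    have hstep : stepArrowRow vl wl i (acc, memo) j
        = (acc ++ [pvArrow vl wl i j], (pvMemoArrow vl wl i j memo).2) := by
      simp only [stepArrowRow]
      rw [h1]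
    rw [hstep]
    obtain ⟨g1, g2⟩ := ih (acc ++ [pvArrow vl wl i j]) (pvMemoArrow vl wl i j memo).2 h2
    refine ⟨?_, g2⟩
    rw [g1]
    simp [List.append_assoc]

theorem pv_B_arrowMat (vl wl : List Char) (m : Nat) :
    ∀ (l : List Nat) (acc : List (List String)) (memo : PySem.Dict (Nat × Nat) Int), pvMemoOK vl wl memo →
      (l.foldl (stepArrowMat vl wl m) (acc, memo)).1
          = acc ++ l.map (fun i => (List.range (m + 1)).map (pvArrow vl wl i)) := by
  intro l
  induction l with
  | nil => intro acc memo _; simp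
  | cons i l ih =>
    intro acc memo hm
    obtain ⟨h1, h2⟩ := pv_B_arrowRow vl wl i (List.range (m + 1)) [] memo hm
    rw [List.foldl_cons]
    have hstep : stepArrowMat vl wl m (acc, memo) i
        = (acc ++ [(List.range (m + 1)).map (pvArrow vl wl i)],
           ((List.range (m + 1)).foldl (stepArrowRow vl wl i) ([], memo)).2) := by
      simp only [stepArrowMat]
      rw [h1]
      simp
    rw [hstep, ih _ _ h2]
    simp [List.append_assoc]

theorem pv_arrow_matrix (vl wl : List Char) :
    (List.range (vl.length + 1)).map (fun i => (List.range (wl.length + 1)).map (pvArrow vl wl i))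
      = pvCanonB vl wl := by
  have hr : ∀ k : Nat, List.range (k + 1) = 0 :: List.range' 1 k := by
    intro k
    rw [List.range_eq_range']
    rfl
  rw [hr vl.length, List.map_cons]
  unfold pvCanonB
  congr 1
  · rw [hr wl.length, List.map_cons]
    unfold pvF0
    congr 1
    rw [show List.replicate wl.length "source" = (List.range' 1 wl.length).map (fun _ => "source") by
      simp [List.map_const']]
    apply List.map_congr_left
    intro j hj
    have hj1 : 1 ≤ j := (List.mem_range'_1.mp hj).1
    unfold pvArrow
    rw [if_pos rfl, if_neg (by omega)]
  · apply List.map_congr_left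
    intro i hi
    have hi1 : 1 ≤ i := (List.mem_range'_1.mp hi).1
    rw [hr wl.length, List.map_cons]
    unfold pvBrow
    congr 1
    · unfold pvArrow
      rw [if_neg (by omega), if_pos rfl]
    · apply List.map_congr_left
      intro j hj
      have hj1 : 1 ≤ j := (List.mem_range'_1.mp hj).1
      unfold pvArrow
      rw [if_neg (by omega), if_neg (by omega)]

theorem pv_portB (v w : String) :
    get_backtrack_alt v w = (pvCanonB v.toList w.toList, pvCanonS v.toList w.toList) := by
  have hm0 : pvMemoOK v.toList w.toList PySem.Dict.empty := by
    intro p x hx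
    rw [PySem.Dict.get?_empty] at hx
    cases hx
  obtain ⟨hs1, hs2⟩ := pv_B_cellMat v.toList w.toList w.toList.length
    (List.range (v.toList.length + 1)) [] PySem.Dict.empty hm0
  have hb1 := pv_B_arrowMat v.toList w.toList w.toList.length
    (List.range (v.toList.length + 1)) []
    ((List.range (v.toList.length + 1)).foldl (stepCellMat v.toList w.toList w.toList.length)
      ([], PySem.Dict.empty)).2 hs2
  have h0 : get_backtrack_alt v w =
      (((List.range (v.toList.length + 1)).foldl (stepArrowMat v.toList w.toList w.toList.length)
          ([], ((List.range (v.toList.length + 1)).foldl (stepCellMat v.toList w.toList w.toList.length)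
            ([], PySem.Dict.empty)).2)).1,
       ((List.range (v.toList.length + 1)).foldl (stepCellMat v.toList w.toList w.toList.length)
          ([], PySem.Dict.empty)).1) := rfl
  rw [h0, hs1, hb1]
  simp only [List.nil_append]
  rw [pv_arrow_matrix]
  unfold pvCanonS pvSrow
  rfl

-- ===== VERDICT (by name: the statement is the Claim_ definition above) =====
theorem get_backtrack_spec : Claim_equal_get_backtrack := by
  intro v w _
  unfold Spec_get_backtrack
  rw [pv_portA, pv_portB]
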